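-- pv_equiv track=rewrite | github.com/Jirehlov/SiglusSceneScriptUtility | src/siglus_ssu/common.py | normalize_ss_quoted_literal_source
-- ===== SOURCE A (Python) =====
-- def normalize_ss_quoted_literal_source(text):
--     s = str(text or "")
--     if len(s) < 2 or s[0] != '"' or s[-1] != '"':
--         return s
--     inner = s[1:-1]
--     out = []
--     i = 0
--     while i < len(inner):
--         ch = inner[i]
--         if ch == "\\":
--             if i + 1 >= len(inner):
--                 out.append("\\\\")
--                 i += 1
--                 continue
--             nxt = inner[i + 1]
--             if nxt in '\\"n':
--                 out.append("\\" + nxt)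
--                 i += 2
--                 continue
--             out.append("\\\\")
--             i += 1
--             continue
--         if ch == '"':
--             out.append('\\"')
--             i += 1
--             continue
--         if ch == "\r":
--             if i + 1 < len(inner) and inner[i + 1] == "\n":
--                 i += 1
--             out.append("\\n")
--             i += 1
--             continue
--         if ch == "\n":
--             out.append("\\n")
--             i += 1
--             continue
--         out.append(ch)
--         i += 1
--     return '"' + "".join(out) + '"'
-- ===== SOURCE B (Python) =====
-- def normalize_ss_quoted_literal_source(text):
--     s = str(text or "")
--     if len(s) < 2 or s[0] != '"' or s[-1] != '"':
--         return s
--     # pass 1: normalize line endings (\r\n and lone \r) to \n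
--     norm = []
--     prev_cr = False
--     for ch in s[1:-1]:
--         if not (prev_cr and ch == "\n"):
--             norm.append("\n" if ch == "\r" else ch)
--         prev_cr = ch == "\r"
--     # pass 2: escape with a one-bit "pending backslash" state
--     out = []
--     pending = False
--     for ch in norm:
--         if pending:
--             pending = False
--             if ch in '\\"n':
--                 out.append("\\" + ch)
--                 continue
--             out.append("\\\\")
--         if ch == "\\":
--             pending = True
--         elif ch == '"':
--             out.append('\\"')
--         elif ch == "\n":
--             out.append("\\n")
--         else:
--             out.append(ch)
--     if pending:
--         out.append("\\\\")
--     return '"' + "".join(out) + '"'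
-- ===== Notes on version B (the rewrite author's own statement) =====
-- stated objective: simpler
-- what changed: Replace A's single index-driven while loop with two-character lookahead (and explicit index skipping) by two simple passes: first normalize \r\n and lone \r to \n with a carriage-return flag, then escape in one forward pass with a one-bit pending-backslash flag; no indexing or lookahead remains.
import Mathlib
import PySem

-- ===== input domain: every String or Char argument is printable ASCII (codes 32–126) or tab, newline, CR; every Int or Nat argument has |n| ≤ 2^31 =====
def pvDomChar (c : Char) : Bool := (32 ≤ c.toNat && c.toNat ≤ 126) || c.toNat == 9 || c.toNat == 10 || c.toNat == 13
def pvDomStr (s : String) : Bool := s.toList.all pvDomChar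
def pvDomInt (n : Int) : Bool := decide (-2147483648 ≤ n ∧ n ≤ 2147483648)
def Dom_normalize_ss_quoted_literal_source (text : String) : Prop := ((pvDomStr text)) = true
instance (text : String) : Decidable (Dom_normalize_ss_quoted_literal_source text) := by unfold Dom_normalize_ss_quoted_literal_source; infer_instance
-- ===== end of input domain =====

-- B replaces A's index-driven while loop with two-character lookahead by two simple passes
-- (normalize line endings with a carriage-return flag, then escape with a pending-backslash flag): simpler decomposition, same cost.

-- ===== PORT A =====
-- A's while loop over inner, consuming 1 or 2 characters per step, as structural recursion.
def pvA_loop : List Char → List String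
  | [] => []
  | ch :: rest =>
    if ch = '\\' then
      match rest with
      | [] => ["\\\\"]
      | nxt :: rest2 =>
        if nxt = '\\' ∨ nxt = '"' ∨ nxt = 'n' then ("\\".push nxt) :: pvA_loop rest2
        else "\\\\" :: pvA_loop (nxt :: rest2)
    else if ch = '"' then "\\\"" :: pvA_loop rest
    else if ch = '\r' then
      if rest.head? = some '\n' then "\\n" :: pvA_loop rest.tail
      else "\\n" :: pvA_loop rest
    else if ch = '\n' then "\\n" :: pvA_loop rest
    else String.singleton ch :: pvA_loop rest
termination_by l => l.length
decreasing_by all_goals simp [List.length_tail]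

def normalize_ss_quoted_literal_source (text : String) : String :=
  let s := text          -- str(text or ""): identity on strings ("" stays "")
  let l := s.toList
  if l.length < 2 ∨ PySem.List.pyGet? l 0 ≠ some '"' ∨ PySem.List.pyGet? l (-1) ≠ some '"' then s
  else
    let inner := PySem.List.slice l (some 1) (some (-1))
    "\"" ++ String.join (pvA_loop inner) ++ "\""

-- ===== PORT B =====
-- pass 1: for ch in inner with a carriage-return flag; CRLF/CR normalized to '\n'.
def pvB_norm : Bool → List Char → List Char
  | _, [] => []
  | prevCr, ch :: rest =>
    (if prevCr ∧ ch = '\n' then [] else [if ch = '\r' then '\n' else ch])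
      ++ pvB_norm (ch == '\r') rest

-- pass 2: for ch in norm with a pending-backslash flag; the final flush (Python's
-- `if pending` after the loop) is the base case.
def pvB_esc : Bool → List Char → List String
  | pending, [] => if pending then ["\\\\"] else []
  | true, ch :: rest =>
    if ch = '\\' ∨ ch = '"' ∨ ch = 'n' then ("\\".push ch) :: pvB_esc false rest
    else
      "\\\\" ::
        (if ch = '\\' then pvB_esc true rest
         else if ch = '"' then "\\\"" :: pvB_esc false rest
         else if ch = '\n' then "\\n" :: pvB_esc false rest
         else String.singleton ch :: pvB_esc false rest)
  | false, ch :: rest =>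
    if ch = '\\' then pvB_esc true rest
    else if ch = '"' then "\\\"" :: pvB_esc false rest
    else if ch = '\n' then "\\n" :: pvB_esc false rest
    else String.singleton ch :: pvB_esc false rest

def normalize_ss_quoted_literal_source_alt (text : String) : String :=
  let s := text
  let l := s.toList
  if l.length < 2 ∨ PySem.List.pyGet? l 0 ≠ some '"' ∨ PySem.List.pyGet? l (-1) ≠ some '"' then s
  else
    let inner := PySem.List.slice l (some 1) (some (-1))
    "\"" ++ String.join (pvB_esc false (pvB_norm false inner)) ++ "\""

-- ===== PRECONDITION & SPEC =====
def Spec_normalize_ss_quoted_literal_source (text : String) (out : String) : Prop := out = normalize_ss_quoted_literal_source_alt text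
instance (text : String) (out : String) : Decidable (Spec_normalize_ss_quoted_literal_source text out) := by unfold Spec_normalize_ss_quoted_literal_source; infer_instance

-- ===== CLAIM (what is proved, stated in full; the proofs are below) =====
def Claim_equal_normalize_ss_quoted_literal_source : Prop := ∀ (text : String), Dom_normalize_ss_quoted_literal_source text → Spec_normalize_ss_quoted_literal_source text (normalize_ss_quoted_literal_source text)

-- ===== LEMMAS AND PROOFS =====

-- step equations for A's loop (the nested match splits the auto-generated equations)
theorem a_nil : pvA_loop [] = [] := by rw [pvA_loop.eq_def]
theorem a_bs_nil : pvA_loop ['\\'] = ["\\\\"] := by rw [pvA_loop.eq_def]; simp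
theorem a_bs_valid (nxt : Char) (r : List Char) (hv : nxt = '\\' ∨ nxt = '"' ∨ nxt = 'n') :
    pvA_loop ('\\' :: nxt :: r) = ("\\".push nxt) :: pvA_loop r := by
  rw [pvA_loop.eq_def]; simp [hv]
theorem a_bs_inv (nxt : Char) (r : List Char) (hv : ¬ (nxt = '\\' ∨ nxt = '"' ∨ nxt = 'n')) :
    pvA_loop ('\\' :: nxt :: r) = "\\\\" :: pvA_loop (nxt :: r) := by
  rw [pvA_loop.eq_def]; simp [hv]
theorem a_q (r : List Char) : pvA_loop ('"' :: r) = "\\\"" :: pvA_loop r := by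
  rw [pvA_loop.eq_def]; simp
theorem a_cr (r : List Char) : pvA_loop ('\r' :: r) =
    if r.head? = some '\n' then "\\n" :: pvA_loop r.tail else "\\n" :: pvA_loop r := by
  rw [pvA_loop.eq_def]; simp
theorem a_nl (r : List Char) : pvA_loop ('\n' :: r) = "\\n" :: pvA_loop r := by
  rw [pvA_loop.eq_def]; simp
theorem a_other (ch : Char) (r : List Char) (h1 : ch ≠ '\\') (h2 : ch ≠ '"')
    (h3 : ch ≠ '\r') (h4 : ch ≠ '\n') :
    pvA_loop (ch :: r) = String.singleton ch :: pvA_loop r := by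
  rw [pvA_loop.eq_def]; simp [h1, h2, h3, h4]

-- step equations for B's passes
theorem n_false (ch : Char) (r : List Char) :
    pvB_norm false (ch :: r) = (if ch = '\r' then '\n' else ch) :: pvB_norm (ch == '\r') r := by
  simp [pvB_norm]
theorem n_true_nl (r : List Char) : pvB_norm true ('\n' :: r) = pvB_norm false r := by
  simp [pvB_norm]
theorem n_true (ch : Char) (r : List Char) (h : ch ≠ '\n') :
    pvB_norm true (ch :: r) = (if ch = '\r' then '\n' else ch) :: pvB_norm (ch == '\r') r := by
  simp [pvB_norm, h]
theorem e_bs (r : List Char) : pvB_esc false ('\\' :: r) = pvB_esc true r := by simp [pvB_esc]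
theorem e_q (r : List Char) : pvB_esc false ('"' :: r) = "\\\"" :: pvB_esc false r := by
  simp [pvB_esc]
theorem e_nl (r : List Char) : pvB_esc false ('\n' :: r) = "\\n" :: pvB_esc false r := by
  simp [pvB_esc]
theorem e_other (ch : Char) (r : List Char) (h1 : ch ≠ '\\') (h2 : ch ≠ '"') (h3 : ch ≠ '\n') :
    pvB_esc false (ch :: r) = String.singleton ch :: pvB_esc false r := by
  simp [pvB_esc, h1, h2, h3]
theorem e_true_valid (ch : Char) (r : List Char) (hv : ch = '\\' ∨ ch = '"' ∨ ch = 'n') :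
    pvB_esc true (ch :: r) = ("\\".push ch) :: pvB_esc false r := by
  simp [pvB_esc, hv]

-- a pending backslash before a character that is not '\\', '"' or 'n' flushes to "\\\\".
theorem pvB_esc_flush (l : List Char)
    (h : ∀ c, l.head? = some c → ¬ (c = '\\' ∨ c = '"' ∨ c = 'n')) :
    pvB_esc true l = "\\\\" :: pvB_esc false l := by
  cases l with
  | nil => simp [pvB_esc]
  | cons ch rest =>
    have hc := h ch rfl
    simp only [pvB_esc, if_neg hc]

-- main lemma: A's loop equals B's two-pass pipeline, by strong induction on length.
theorem pv_main (l : List Char) : pvA_loop l = pvB_esc false (pvB_norm false l) := by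
  induction hn : l.length using Nat.strong_induction_on generalizing l with
  | _ n ih =>
  cases l with
  | nil => simp [a_nil, pvB_norm, pvB_esc]
  | cons ch rest =>
    have hstep : ∀ (m : List Char), m.length < n → pvA_loop m = pvB_esc false (pvB_norm false m) := by
      intro m hm; exact ih m.length (hn ▸ hm) m rfl
    subst hn
    by_cases hbs : ch = '\\'
    · subst hbs
      cases rest with
      | nil => simp [a_bs_nil, pvB_norm, pvB_esc]
      | cons nxt rest2 =>
        by_cases hv : nxt = '\\' ∨ nxt = '"' ∨ nxt = 'n'
        · have hnr : nxt ≠ '\r' := by rcases hv with h | h | h <;> subst h <;> decide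
          have hbe : (nxt == '\r') = false := by simp [hnr]
          rw [a_bs_valid nxt rest2 hv, n_false, if_neg (by decide),
              show (('\\' : Char) == '\r') = false from by decide,
              n_false, if_neg hnr, hbe, e_bs, e_true_valid nxt _ hv,
              hstep rest2 (by simp)]
        · rw [a_bs_inv nxt rest2 hv, n_false, if_neg (by decide),
              show (('\\' : Char) == '\r') = false from by decide, e_bs]
          have hhead : ∀ c, (pvB_norm false (nxt :: rest2)).head? = some c →
              ¬ (c = '\\' ∨ c = '"' ∨ c = 'n') := by
            intro c hc
            rw [n_false] at hc
            simp only [List.head?_cons, Option.some.injEq] at hc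
            subst hc
            by_cases hnr : nxt = '\r'
            · simp [hnr]
            · simpa [if_neg hnr] using hv
          rw [pvB_esc_flush _ hhead, hstep (nxt :: rest2) (by simp)]
    · by_cases hq : ch = '"'
      · subst hq
        rw [a_q, n_false, if_neg (by decide),
            show (('"' : Char) == '\r') = false from by decide, e_q,
            hstep rest (by simp)]
      · by_cases hr : ch = '\r'
        · subst hr
          rw [n_false, if_pos rfl, show (('\r' : Char) == '\r') = true from by decide]
          cases rest with
          | nil =>
            rw [a_cr]
            simp [pvB_norm, pvB_esc, a_nil]
          | cons c2 rest2 =>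
            by_cases hc2 : c2 = '\n'
            · subst hc2
              rw [a_cr, if_pos (show ('\n' :: rest2).head? = some '\n' from rfl), List.tail_cons,
                  n_true_nl, e_nl, hstep rest2 (by simp)]
            · rw [a_cr, if_neg (by simpa using hc2), n_true c2 rest2 hc2, e_nl,
                  ← n_false, hstep (c2 :: rest2) (by simp)]
        · by_cases hnl : ch = '\n'
          · subst hnl
            rw [a_nl, n_false, if_neg (by decide),
                show (('\n' : Char) == '\r') = false from by decide, e_nl,
                hstep rest (by simp)]
          · have hbe : (ch == '\r') = false := by simp [hr]
            rw [a_other ch rest hbs hq hr hnl, n_false, if_neg hr, hbe,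
                e_other ch _ hbs hq hnl, hstep rest (by simp)]

-- ===== VERDICT (by name: the statement is the Claim_ definition above) =====
theorem normalize_ss_quoted_literal_source_spec : Claim_equal_normalize_ss_quoted_literal_source := by
  intro text _
  unfold Spec_normalize_ss_quoted_literal_source
  unfold normalize_ss_quoted_literal_source normalize_ss_quoted_literal_source_alt
  simp only [pv_main]
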